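-- pv_equiv track=rewrite | github.com/gogs1998/GN | onchain-lab/src/metrics/formulas.py | _sanitize_bucket
-- ===== SOURCE A (Python) =====
-- def _sanitize_bucket(bucket: str) -> str:
--     sanitized = bucket.lower()
--     for old, new in [
--         ("+", "_plus"),
--         ("-", "_"),
--         (" ", ""),
--         (">", "_gt"),
--         ("<", "_lt"),
--         ("/", "_"),
--         ("(", ""),
--         (")", ""),
--     ]:
--         sanitized = sanitized.replace(old, new)
--     sanitized = sanitized.replace("__", "_")
--     return sanitized
-- ===== SOURCE B (Python) =====
-- _MAP = {'+': '_plus', '-': '_', ' ': '', '>': '_gt', '<': '_lt', '/': '_', '(': '', ')': ''}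
--
--
-- def _sanitize_bucket(bucket: str) -> str:
--     out = ''.join(_MAP.get(ch, ch) for ch in bucket.lower())
--     return out.replace('__', '_')
-- ===== Notes on version B (the rewrite author's own statement) =====
-- stated objective: idiomatic
-- what changed: A's eight sequential full-string replace passes are replaced by one table-driven pass: a dict maps each special character to its replacement string and the lowered string is rebuilt in a single join; the final double-underscore collapse is kept as the one remaining replace.
import Mathlib
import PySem

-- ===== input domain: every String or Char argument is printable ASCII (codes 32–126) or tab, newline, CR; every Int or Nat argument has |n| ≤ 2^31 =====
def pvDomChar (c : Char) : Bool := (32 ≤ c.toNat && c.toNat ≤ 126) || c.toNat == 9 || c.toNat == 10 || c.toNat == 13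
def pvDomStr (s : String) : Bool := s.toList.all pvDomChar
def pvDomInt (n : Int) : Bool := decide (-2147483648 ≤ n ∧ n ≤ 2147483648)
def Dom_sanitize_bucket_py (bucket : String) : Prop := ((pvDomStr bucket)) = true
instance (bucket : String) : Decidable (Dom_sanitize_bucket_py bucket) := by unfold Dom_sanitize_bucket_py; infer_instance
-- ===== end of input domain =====

-- B replaces A's eight sequential full-string .replace passes with one table-driven pass
-- (a dict from special char to replacement, joined once); objective: idiomatic single pass.

-- ===== PORT A =====
def sanitize_bucket_py (bucket : String) : String :=
  let s0 := PySem.Str.lower bucket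
  let s := List.foldl (fun acc (p : String × String) => PySem.Str.replace acc p.1 p.2) s0
    [("+", "_plus"), ("-", "_"), (" ", ""), (">", "_gt"), ("<", "_lt"), ("/", "_"), ("(", ""), (")", "")]
  PySem.Str.replace s "__" "_"

-- ===== PORT B =====
def sbMap : PySem.Dict Char String :=
  ((((((((PySem.Dict.empty).insert '+' "_plus").insert '-' "_").insert ' ' "").insert '>' "_gt").insert '<' "_lt").insert '/' "_").insert '(' "").insert ')' ""

def sanitize_bucket_py_alt (bucket : String) : String :=
  let out := PySem.Str.join ""
    ((PySem.Str.lower bucket).toList.map (fun ch => sbMap.getD ch (String.ofList [ch])))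
  PySem.Str.replace out "__" "_"

-- ===== PRECONDITION & SPEC =====
def Spec_sanitize_bucket_py (bucket : String) (out : String) : Prop := out = sanitize_bucket_py_alt bucket
instance (bucket : String) (out : String) : Decidable (Spec_sanitize_bucket_py bucket out) := by unfold Spec_sanitize_bucket_py; infer_instance

-- ===== CLAIM (what is proved, stated in full; the proofs are below) =====
def Claim_equal_sanitize_bucket_py : Prop := ∀ (bucket : String), Dom_sanitize_bucket_py bucket → Spec_sanitize_bucket_py bucket (sanitize_bucket_py bucket)

-- ===== LEMMAS AND PROOFS =====

-- single-character-pattern str.replace is a flatMap with this per-character function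
def repl1 (c : Char) (r : List Char) (x : Char) : List Char := if x = c then r else [x]

theorem go_single (c : Char) (r : List Char) :
    ∀ (l : List Char) (fuel : Nat) (acc : List Char), l.length ≤ fuel →
      PySem.Chars.replace.go [c] r fuel l acc = acc.reverse ++ l.flatMap (repl1 c r) := by
  intro l
  induction l with
  | nil =>
    intro fuel acc _
    cases fuel <;> simp [PySem.Chars.replace.go]
  | cons h t ih =>
    intro fuel acc hle
    cases fuel with
    | zero => simp at hle
    | succ f =>
      rw [PySem.Chars.replace.go]
      by_cases hc : h = c
      · subst hc
        rw [if_pos (by simp [List.isPrefixOf])]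
        simp only [List.length_singleton, List.drop_succ_cons, List.drop_zero]
        rw [ih f _ (by simpa using hle)]
        simp [repl1]
      · rw [if_neg (by simp [List.isPrefixOf]; exact fun e => hc e.symm),
            ih f _ (by simpa using hle)]
        simp [repl1, hc]

theorem replace_single (cs : List Char) (c : Char) (r : List Char) :
    PySem.Chars.replace cs [c] r = cs.flatMap (repl1 c r) := by
  simpa [PySem.Chars.replace] using go_single c r cs cs.length [] le_rfl

-- A's eight passes, composed into one per-character function, agree with B's table lookup
theorem point (x : Char) :
    (repl1 '+' "_plus".toList x).flatMap (fun a =>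
      (repl1 '-' "_".toList a).flatMap (fun b =>
        (repl1 ' ' [] b).flatMap (fun c =>
          (repl1 '>' "_gt".toList c).flatMap (fun d =>
            (repl1 '<' "_lt".toList d).flatMap (fun e =>
              (repl1 '/' "_".toList e).flatMap (fun f =>
                (repl1 '(' [] f).flatMap (repl1 ')' []))))))) =
    (sbMap.getD x (String.ofList [x])).toList := by
  by_cases h1 : x = '+'
  · subst h1; decide
  by_cases h2 : x = '-'
  · subst h2; decide
  by_cases h3 : x = ' '
  · subst h3; decide
  by_cases h4 : x = '>'
  · subst h4; decide
  by_cases h5 : x = '<'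
  · subst h5; decide
  by_cases h6 : x = '/'
  · subst h6; decide
  by_cases h7 : x = '('
  · subst h7; decide
  by_cases h8 : x = ')'
  · subst h8; decide
  have bs : ∀ (c : Char), ¬ x = c → (c == x) = false := fun c hc => by
    rw [beq_eq_false_iff_ne]; exact fun e => hc e.symm
  simp [repl1, h1, h2, h3, h4, h5, h6, h7, h8, sbMap,
    PySem.Dict.getD, PySem.Dict.get?, PySem.Dict.insert, PySem.Dict.empty, List.find?,
    bs _ h1, bs _ h2, bs _ h3, bs _ h4, bs _ h5, bs _ h6, bs _ h7, bs _ h8, String.toList_ofList]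

theorem intercalate_nil {α : Type} (l : List (List α)) : List.intercalate [] l = l.flatten := by
  induction l with
  | nil => simp [List.intercalate]
  | cons h t ih => cases t <;> simp_all [List.intercalate, List.intersperse]

theorem flatMap_eq_flatten_map {α β : Type} (l : List α) (f : α → List β) :
    l.flatMap f = (l.map f).flatten := by
  induction l with
  | nil => rfl
  | cons h t ih => simp [ih]

theorem middle_eq (bucket : String) :
    List.foldl (fun acc (p : String × String) => PySem.Str.replace acc p.1 p.2)
      (PySem.Str.lower bucket)
      [("+", "_plus"), ("-", "_"), (" ", ""), (">", "_gt"), ("<", "_lt"), ("/", "_"), ("(", ""), (")", "")] =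
    PySem.Str.join ""
      ((PySem.Str.lower bucket).toList.map (fun ch => sbMap.getD ch (String.ofList [ch]))) := by
  apply String.toList_inj.mp
  have hplus : ("+" : String).toList = ['+'] := by decide
  have hminus : ("-" : String).toList = ['-'] := by decide
  have hsp : (" " : String).toList = [' '] := by decide
  have hgt : (">" : String).toList = ['>'] := by decide
  have hlt : ("<" : String).toList = ['<'] := by decide
  have hsl : ("/" : String).toList = ['/'] := by decide
  have hop : ("(" : String).toList = ['('] := by decide
  have hcl : (")" : String).toList = [')'] := by decide
  have hemp : ("" : String).toList = [] := by decide
  simp only [List.foldl, PySem.Str.toList_replace,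
    hplus, hminus, hsp, hgt, hlt, hsl, hop, hcl, hemp,
    replace_single, List.flatMap_assoc, point]
  simp only [PySem.Str.toList_join, hemp, PySem.Chars.join, intercalate_nil,
    List.map_map, flatMap_eq_flatten_map]
  rfl

-- ===== VERDICT (by name: the statement is the Claim_ definition above) =====
theorem sanitize_bucket_py_spec : Claim_equal_sanitize_bucket_py := by
  intro bucket _
  unfold Spec_sanitize_bucket_py sanitize_bucket_py sanitize_bucket_py_alt
  exact congrArg (fun s => PySem.Str.replace s "__" "_") (middle_eq bucket)
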